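-- pv_equiv track=rewrite | github.com/imyers236/CPSC334-Final-Project | src/mysklearn/mypytable.py | find_matches_and_nons
-- ===== SOURCE A (Python) =====
-- def find_matches_and_nons(key_columns_left, key_columns_right):
--     """
--     Returns:
--         a dict of the matches with the indexes of in each table and the
--             non matches and their indexes
--     """
--     matches_dict = {}
--     left_nons = []
--     right_nons = []
--
--     # finds where there are matches
--     for i,row_left in enumerate(key_columns_left):
--         for j,row_right in enumerate(key_columns_right):
--             if row_left == row_right:
--                 if i not in matches_dict:
--                     matches_dict[i] = [j]
--                 else:
--                     matches_dict[i].append(j)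
--         if i not in matches_dict:
--             left_nons.append(i)
--     j = 0
--     while j < len(key_columns_right):
--         exist_match = False
--         for match_list in matches_dict.values():
--             if j in match_list:
--                 exist_match = True
--         if not exist_match:
--             right_nons.append(j)
--         j += 1
--     return matches_dict, left_nons, right_nons
-- ===== SOURCE B (Python) =====
-- def find_matches_and_nons(key_columns_left, key_columns_right):
--     # hash right rows once: row -> list of right indices
--     right_index = {}
--     for j, row in enumerate(key_columns_right):
--         right_index.setdefault(tuple(row), []).append(j)
--     matches_dict = {}
--     left_nons = []
--     for i, row in enumerate(key_columns_left):
--         js = right_index.get(tuple(row), [])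
--         if js:
--             matches_dict[i] = list(js)
--         else:
--             left_nons.append(i)
--     left_keys = {tuple(row) for row in key_columns_left}
--     right_nons = [j for j, row in enumerate(key_columns_right)
--                   if tuple(row) not in left_keys]
--     return matches_dict, left_nons, right_nons
-- ===== Notes on version B (the rewrite author's own statement) =====
-- stated objective: alternative
-- what changed: Replaces the nested left-by-right scans and the membership sweep over all match lists with a one-pass hash index of right rows (row -> index list), a single lookup per left row, and a left-row key set for right_nons.
import Mathlib
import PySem

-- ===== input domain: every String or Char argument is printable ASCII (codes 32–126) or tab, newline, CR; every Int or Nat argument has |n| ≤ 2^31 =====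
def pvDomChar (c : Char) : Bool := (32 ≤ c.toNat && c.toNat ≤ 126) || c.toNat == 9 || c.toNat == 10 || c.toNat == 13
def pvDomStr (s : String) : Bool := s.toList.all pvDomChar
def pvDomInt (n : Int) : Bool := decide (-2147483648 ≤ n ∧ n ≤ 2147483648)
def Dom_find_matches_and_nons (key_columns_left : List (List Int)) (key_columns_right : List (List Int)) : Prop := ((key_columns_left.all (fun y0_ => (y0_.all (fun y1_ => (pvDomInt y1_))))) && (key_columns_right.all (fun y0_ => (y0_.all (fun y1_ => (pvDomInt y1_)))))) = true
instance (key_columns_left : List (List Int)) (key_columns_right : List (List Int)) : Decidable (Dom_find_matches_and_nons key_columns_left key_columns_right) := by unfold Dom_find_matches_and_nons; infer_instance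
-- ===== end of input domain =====

-- B replaces A's nested left-by-right scans and its membership sweep over all match lists
-- with a one-pass hash index of right rows and a left-row key set (objective: alternative).

-- ===== PORT A =====
def find_matches_and_nons (key_columns_left : List (List Int)) (key_columns_right : List (List Int)) : (List (Int × List Int)) × List Int × List Int :=
  -- matches_dict = {}; left_nons = []; nested enumerate loops
  let st := (PySem.List.enumerate key_columns_left).foldl
    (fun (st : PySem.Dict Int (List Int) × List Int) (p : Int × List Int) =>
      let md := (PySem.List.enumerate key_columns_right).foldl
        (fun (md : PySem.Dict Int (List Int)) q =>
          if p.2 = q.2 then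
            if !(md.contains p.1) then md.insert p.1 [q.1]
            else md.modify p.1 [] (· ++ [q.1])
          else md) st.1
      if !(md.contains p.1) then (md, st.2 ++ [p.1]) else (md, st.2))
    (PySem.Dict.empty, [])
  -- j = 0; while j < len(key_columns_right): …
  let right_nons := (PySem.List.pyRange 0 key_columns_right.length 1).foldl
    (fun (acc : List Int) j =>
      let exist_match := st.1.values.foldl
        (fun (e : Bool) ml => if j ∈ ml then true else e) false
      if !exist_match then acc ++ [j] else acc) []
  (st.1.items, st.2, right_nons)

-- ===== PORT B =====
def find_matches_and_nons_alt (key_columns_left : List (List Int)) (key_columns_right : List (List Int)) : (List (Int × List Int)) × List Int × List Int :=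
  -- right_index: row -> list of right indices (setdefault(..., []).append(j))
  let right_index : PySem.Dict (List Int) (List Int) :=
    (PySem.List.enumerate key_columns_right).foldl
      (fun (d : PySem.Dict (List Int) (List Int)) q => d.modify q.2 [] (· ++ [q.1]))
      PySem.Dict.empty
  -- one lookup per left row
  let ml := (PySem.List.enumerate key_columns_left).foldl
    (fun (st : PySem.Dict Int (List Int) × List Int) (p : Int × List Int) =>
      let js := right_index.getD p.2 []
      if js = [] then (st.1, st.2 ++ [p.1]) else (st.1.insert p.1 js, st.2))
    (PySem.Dict.empty, [])
  -- left_keys = {row for row in left}; right_nons by one membership test per right row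
  let left_keys : PySem.Set (List Int) := PySem.Set.ofList key_columns_left
  let right_nons := ((PySem.List.enumerate key_columns_right).filter
      (fun q => !(PySem.Set.contains left_keys q.2))).map (·.1)
  (ml.1.items, ml.2, right_nons)

-- ===== PRECONDITION & SPEC =====
def Spec_find_matches_and_nons (key_columns_left : List (List Int)) (key_columns_right : List (List Int)) (out : (List (Int × List Int)) × List Int × List Int) : Prop := out = find_matches_and_nons_alt key_columns_left key_columns_right
instance (key_columns_left : List (List Int)) (key_columns_right : List (List Int)) (out : (List (Int × List Int)) × List Int × List Int) : Decidable (Spec_find_matches_and_nons key_columns_left key_columns_right out) := by unfold Spec_find_matches_and_nons; infer_instance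

-- ===== CLAIM (what is proved, stated in full; the proofs are below) =====
def Claim_equal_find_matches_and_nons : Prop := ∀ (key_columns_left : List (List Int)) (key_columns_right : List (List Int)), Dom_find_matches_and_nons key_columns_left key_columns_right → Spec_find_matches_and_nons key_columns_left key_columns_right (find_matches_and_nons key_columns_left key_columns_right)

-- ===== LEMMAS AND PROOFS =====

-- the right indices matching a row v, in order (what A's inner loop collects for one left row)
def selR (key_columns_right : List (List Int)) (v : List Int) : List Int :=
  ((PySem.List.enumerate key_columns_right).filter (fun q => q.2 == v)).map (·.1)

-- the matches_dict items contributed by the left rows enumerated from index s on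
def mdTail (R L : List (List Int)) (s : Int) : List (Int × List Int) :=
  (PySem.List.enumerate L s).filterMap (fun p => if selR R p.2 = [] then none else some (p.1, selR R p.2))

-- the left_nons contributed by the left rows enumerated from index s on
def lnTail (R L : List (List Int)) (s : Int) : List Int :=
  (PySem.List.enumerate L s).filterMap (fun p => if selR R p.2 = [] then some p.1 else none)

theorem get?_mk_append_self (xs : List (Int × List Int)) (i : Int) (acc : List Int)
    (hx : i ∉ xs.map (·.1)) :
    (PySem.Dict.mk (xs ++ [(i, acc)])).get? i = some acc := by
  induction xs with
  | nil => simp [PySem.Dict.get?_mk_cons]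
  | cons x t ih =>
    obtain ⟨k, w⟩ := x
    simp only [List.map_cons, List.mem_cons, not_or] at hx
    rw [List.cons_append, PySem.Dict.get?_mk_cons]
    simp only [beq_iff_eq]
    rw [if_neg (fun h => hx.1 h.symm)]
    exact ih hx.2

theorem map_overwrite_last (xs : List (Int × List Int)) (i : Int) (w : List Int)
    (hx : i ∉ xs.map (·.1)) :
    (xs ++ [(i, w)]).map (fun p => if (p.1 == i) = true then (i, w) else p)
      = xs ++ [(i, w)] := by
  induction xs with
  | nil => simp
  | cons x t ih =>
    simp only [List.map_cons, List.mem_cons, not_or] at hx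
    rw [List.cons_append, List.map_cons, ih hx.2]
    have hne : (x.1 == i) = false := by
      simp only [beq_eq_false_iff_ne]
      exact fun h => hx.1 h.symm
    simp [hne]

theorem innerA_mem (v : List Int) (l : List (Int × List Int)) (xs : List (Int × List Int))
    (i : Int) (acc : List Int) (hx : i ∉ xs.map (·.1)) :
    l.foldl (fun (md : PySem.Dict Int (List Int)) q =>
        if v = q.2 then
          if !(md.contains i) then md.insert i [q.1]
          else md.modify i [] (· ++ [q.1])
        else md) (PySem.Dict.mk (xs ++ [(i, acc)]))
      = PySem.Dict.mk (xs ++ [(i, acc ++ ((l.filter (fun q => q.2 == v)).map (·.1)))]) := by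
  induction l generalizing acc with
  | nil => simp
  | cons q l ih =>
    have hc : (PySem.Dict.mk (xs ++ [(i, acc)])).contains i = true := by
      rw [PySem.Dict.contains_eq_decide_mem_keys]
      simp [PySem.Dict.keys_mk]
    by_cases hv : v = q.2
    · have hstep : (if v = q.2 then
          (if !((PySem.Dict.mk (xs ++ [(i, acc)])).contains i) then
            (PySem.Dict.mk (xs ++ [(i, acc)])).insert i [q.1]
          else (PySem.Dict.mk (xs ++ [(i, acc)])).modify i [] (· ++ [q.1]))
        else (PySem.Dict.mk (xs ++ [(i, acc)])))
          = PySem.Dict.mk (xs ++ [(i, acc ++ [q.1])]) := by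
        rw [if_pos hv, hc]
        simp only [Bool.not_true, Bool.false_eq_true, if_false]
        have hmod : (PySem.Dict.mk (xs ++ [(i, acc)])).modify i [] (· ++ [q.1])
            = (PySem.Dict.mk (xs ++ [(i, acc)])).insert i
                (((PySem.Dict.mk (xs ++ [(i, acc)])).getD i []) ++ [q.1]) := rfl
        rw [hmod, PySem.Dict.getD_eq_get?_getD, get?_mk_append_self xs i acc hx]
        apply PySem.Dict.ext
        rw [PySem.Dict.items_insert_of_contains _ _ hc]
        simpa using map_overwrite_last xs i (acc ++ [q.1]) hx
      rw [List.foldl_cons, hstep, ih (acc ++ [q.1])]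
      have hq : (q.2 == v) = true := by simp [hv.symm]
      simp [hq]
    · have hq : (q.2 == v) = false := by
        simp only [beq_eq_false_iff_ne]
        exact fun h => hv h.symm
      rw [List.foldl_cons, if_neg hv, ih acc]
      simp [hq]

theorem innerA_fresh (v : List Int) (l : List (Int × List Int)) (xs : List (Int × List Int))
    (i : Int) (hx : i ∉ xs.map (·.1)) :
    l.foldl (fun (md : PySem.Dict Int (List Int)) q =>
        if v = q.2 then
          if !(md.contains i) then md.insert i [q.1]
          else md.modify i [] (· ++ [q.1])
        else md) (PySem.Dict.mk xs)
      = PySem.Dict.mk (xs ++ (if ((l.filter (fun q => q.2 == v)).map (·.1)) = [] then []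
          else [(i, (l.filter (fun q => q.2 == v)).map (·.1))])) := by
  induction l with
  | nil => simp
  | cons q l ih =>
    have hc : (PySem.Dict.mk xs).contains i = false := by
      rw [PySem.Dict.contains_eq_decide_mem_keys]
      simp only [PySem.Dict.keys_mk, decide_eq_false_iff_not]
      exact hx
    by_cases hv : v = q.2
    · have hstep : (if v = q.2 then
          (if !((PySem.Dict.mk xs).contains i) then (PySem.Dict.mk xs).insert i [q.1]
          else (PySem.Dict.mk xs).modify i [] (· ++ [q.1]))
        else (PySem.Dict.mk xs))
          = PySem.Dict.mk (xs ++ [(i, [q.1])]) := by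
        rw [if_pos hv, hc]
        simp only [Bool.not_false, if_true]
        apply PySem.Dict.ext
        rw [PySem.Dict.items_insert_of_not_contains _ _ hc]
      rw [List.foldl_cons, hstep, innerA_mem v l xs i [q.1] hx]
      have hq : (q.2 == v) = true := by simp [hv.symm]
      simp [hq]
    · have hq : (q.2 == v) = false := by
        simp only [beq_eq_false_iff_ne]
        exact fun h => hv h.symm
      rw [List.foldl_cons, if_neg hv, ih,
        show List.filter (fun q => q.2 == v) (q :: l) = List.filter (fun q => q.2 == v) l from by
          simp [hq]]

theorem selR_eq (R : List (List Int)) (v : List Int) :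
    ((PySem.List.enumerate R).filter (fun q => q.2 == v)).map (·.1) = selR R v := rfl

theorem outerA (R : List (List Int)) (L : List (List Int)) :
    ∀ (s : Int) (xs : List (Int × List Int)) (ln : List Int),
    (∀ k ∈ xs.map (·.1), k < s) →
    (PySem.List.enumerate L s).foldl
      (fun (st : PySem.Dict Int (List Int) × List Int) (p : Int × List Int) =>
        let md := (PySem.List.enumerate R).foldl
          (fun (md : PySem.Dict Int (List Int)) q =>
            if p.2 = q.2 then
              if !(md.contains p.1) then md.insert p.1 [q.1]
              else md.modify p.1 [] (· ++ [q.1])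
            else md) st.1
        if !(md.contains p.1) then (md, st.2 ++ [p.1]) else (md, st.2))
      (PySem.Dict.mk xs, ln)
    = (PySem.Dict.mk (xs ++ mdTail R L s), ln ++ lnTail R L s) := by
  induction L with
  | nil => intro s xs ln _; simp [mdTail, lnTail, PySem.List.enumerate_nil]
  | cons row L ih =>
    intro s xs ln hlt
    rw [PySem.List.enumerate_cons, List.foldl_cons]
    have hx : s ∉ xs.map (·.1) := fun h => lt_irrefl s (hlt s h)
    rw [innerA_fresh row (PySem.List.enumerate R) xs s hx]
    rw [selR_eq]
    dsimp only
    by_cases hsel : selR R row = []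
    · have hc : (PySem.Dict.mk (xs ++ if selR R row = [] then []
          else [(s, selR R row)])).contains s = false := by
        rw [if_pos hsel, List.append_nil, PySem.Dict.contains_eq_decide_mem_keys]
        simp only [PySem.Dict.keys_mk, decide_eq_false_iff_not]
        exact hx
      rw [hc]
      simp only [Bool.not_false, if_true, if_pos hsel, List.append_nil]
      rw [ih (s + 1) xs (ln ++ [s]) (fun k hk => lt_trans (hlt k hk) (by omega))]
      simp [mdTail, lnTail, PySem.List.enumerate_cons, hsel, List.append_assoc]
    · have hc : (PySem.Dict.mk (xs ++ if selR R row = [] then []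
          else [(s, selR R row)])).contains s = true := by
        rw [if_neg hsel, PySem.Dict.contains_eq_decide_mem_keys]
        simp [PySem.Dict.keys_mk]
      rw [hc]
      simp only [Bool.not_true, Bool.false_eq_true, if_false, if_neg hsel]
      rw [ih (s + 1) (xs ++ [(s, selR R row)]) ln (by
        intro k hk
        simp only [List.map_append, List.mem_append, List.map_cons] at hk
        rcases hk with hk | hk
        · exact lt_trans (hlt k hk) (by omega)
        · have : k = s := by simpa using hk
          omega)]
      simp [mdTail, lnTail, PySem.List.enumerate_cons, hsel, List.append_assoc]

theorem outerB (R : List (List Int)) (ridx : PySem.Dict (List Int) (List Int))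
    (hg : ∀ v, ridx.getD v [] = selR R v) (L : List (List Int)) :
    ∀ (s : Int) (xs : List (Int × List Int)) (ln : List Int),
    (∀ k ∈ xs.map (·.1), k < s) →
    (PySem.List.enumerate L s).foldl
      (fun (st : PySem.Dict Int (List Int) × List Int) (p : Int × List Int) =>
        let js := ridx.getD p.2 []
        if js = [] then (st.1, st.2 ++ [p.1]) else (st.1.insert p.1 js, st.2))
      (PySem.Dict.mk xs, ln)
    = (PySem.Dict.mk (xs ++ mdTail R L s), ln ++ lnTail R L s) := by
  induction L with
  | nil => intro s xs ln _; simp [mdTail, lnTail, PySem.List.enumerate_nil]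
  | cons row L ih =>
    intro s xs ln hlt
    rw [PySem.List.enumerate_cons, List.foldl_cons]
    have hx : s ∉ xs.map (·.1) := fun h => lt_irrefl s (hlt s h)
    dsimp only
    rw [hg]
    by_cases hsel : selR R row = []
    · rw [if_pos hsel]
      rw [ih (s + 1) xs (ln ++ [s]) (fun k hk => lt_trans (hlt k hk) (by omega))]
      simp [mdTail, lnTail, PySem.List.enumerate_cons, hsel, List.append_assoc]
    · rw [if_neg hsel]
      have hc : (PySem.Dict.mk xs).contains s = false := by
        rw [PySem.Dict.contains_eq_decide_mem_keys]
        simp only [PySem.Dict.keys_mk, decide_eq_false_iff_not]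
        exact hx
      have hins : (PySem.Dict.mk xs).insert s (selR R row)
          = PySem.Dict.mk (xs ++ [(s, selR R row)]) := by
        apply PySem.Dict.ext
        rw [PySem.Dict.items_insert_of_not_contains _ _ hc]
      rw [hins, ih (s + 1) (xs ++ [(s, selR R row)]) ln (by
        intro k hk
        simp only [List.map_append, List.mem_append, List.map_cons] at hk
        rcases hk with hk | hk
        · exact lt_trans (hlt k hk) (by omega)
        · have : k = s := by simpa using hk
          omega)]
      simp [mdTail, lnTail, PySem.List.enumerate_cons, hsel, List.append_assoc]

theorem ridx_getD (R : List (List Int)) (v : List Int) :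
    ((PySem.List.enumerate R).foldl
      (fun (d : PySem.Dict (List Int) (List Int)) q => d.modify q.2 [] (· ++ [q.1]))
      PySem.Dict.empty).getD v [] = selR R v := by
  rw [show (PySem.List.enumerate R).foldl
      (fun (d : PySem.Dict (List Int) (List Int)) q => d.modify q.2 [] (· ++ [q.1]))
      PySem.Dict.empty
    = (((PySem.List.enumerate R).map (fun q => (q.2, q.1))).foldl
        (fun (d : PySem.Dict (List Int) (List Int)) p => d.modify p.1 [] (· ++ [p.2]))
        PySem.Dict.empty) from by rw [List.foldl_map]]
  rw [PySem.Dict.getD_foldl_modify_append]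
  simp [selR, List.filter_map, Function.comp_def, List.map_map]

theorem anyFold (j : Int) (ls : List (List Int)) (b : Bool) :
    ls.foldl (fun (e : Bool) ml => if j ∈ ml then true else e) b
      = (b || ls.any (fun ml => decide (j ∈ ml))) := by
  induction ls generalizing b with
  | nil => simp
  | cons x t ih =>
    rw [List.foldl_cons, ih]
    by_cases h : j ∈ x <;> simp [h]

theorem mem_selR (R : List (List Int)) (v : List Int) (j : Int) :
    j ∈ selR R v ↔ ∃ (k : Nat) (_ : k < R.length), j = (k : Int) ∧ R[k] = v := by
  simp only [selR, List.mem_map, List.mem_filter, PySem.List.mem_enumerate_iff]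
  constructor
  · rintro ⟨q, ⟨⟨k, hk, rfl⟩, hbeq⟩, rfl⟩
    exact ⟨k, hk, by simp, by simpa using hbeq⟩
  · rintro ⟨k, hk, rfl, hv⟩
    exact ⟨((k : Int), R[k]), ⟨⟨k, hk, by simp⟩, by simpa using hv⟩, rfl⟩

theorem exist_iff (R L : List (List Int)) (k : Nat) (hk : k < R.length) :
    ((mdTail R L 0).map (·.2)).any (fun ml => decide ((k : Int) ∈ ml)) = true ↔ R[k] ∈ L := by
  constructor
  · intro h
    rcases List.any_eq_true.mp h with ⟨ml, hml, hdec⟩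
    rcases List.mem_map.mp hml with ⟨pr, hpr, rfl⟩
    rcases List.mem_filterMap.mp hpr with ⟨p, hp, hf⟩
    rcases (PySem.List.mem_enumerate_iff L 0 p).mp hp with ⟨i', hi', rfl⟩
    dsimp only at hf
    by_cases hsel : selR R L[i'] = []
    · rw [if_pos hsel] at hf; cases hf
    · rw [if_neg hsel] at hf
      cases hf
      have hmem : (k : Int) ∈ selR R L[i'] := of_decide_eq_true hdec
      rcases (mem_selR R L[i'] (k : Int)).mp hmem with ⟨k2, hk2, hkk, hv⟩
      have hk2k : k2 = k := by exact_mod_cast hkk.symm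
      subst hk2k
      exact hv ▸ List.getElem_mem hi'
  · intro hRk
    rcases List.mem_iff_getElem.mp hRk with ⟨i', hi', hEq⟩
    have hksel : (k : Int) ∈ selR R L[i'] :=
      (mem_selR R L[i'] (k : Int)).mpr ⟨k, hk, rfl, hEq.symm⟩
    have hne : selR R L[i'] ≠ [] := List.ne_nil_of_mem hksel
    refine List.any_eq_true.mpr ⟨selR R L[i'], List.mem_map.mpr ?_, decide_eq_true hksel⟩
    refine ⟨((0 : Int) + (i' : Int), selR R L[i']), List.mem_filterMap.mpr ?_, rfl⟩
    refine ⟨((0 : Int) + (i' : Int), L[i']), (PySem.List.mem_enumerate_iff L 0 _).mpr ⟨i', hi', rfl⟩, ?_⟩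
    dsimp only
    rw [if_neg hne]

theorem right_nons_eq (R L : List (List Int)) :
    (PySem.List.pyRange 0 R.length 1).foldl
      (fun (acc : List Int) j =>
        if !(((mdTail R L 0).map (·.2)).foldl
          (fun (e : Bool) ml => if j ∈ ml then true else e) false) then acc ++ [j] else acc) []
    = ((PySem.List.enumerate R).filter
        (fun q => !(PySem.Set.contains (PySem.Set.ofList L) q.2))).map (·.1) := by
  have h1 : ∀ j : Int, ((mdTail R L 0).map (·.2)).foldl
      (fun (e : Bool) ml => if j ∈ ml then true else e) false
      = ((mdTail R L 0).map (·.2)).any (fun ml => decide (j ∈ ml)) := by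
    intro j; rw [anyFold]; simp
  simp only [h1]
  rw [PySem.List.foldl_append_if
    (fun j : Int => !(((mdTail R L 0).map (·.2)).any (fun ml => decide (j ∈ ml))))
    (fun j : Int => j)]
  rw [PySem.List.enumerate_eq_map_pyRange R [], List.filter_map, List.map_map]
  simp only [List.nil_append]
  have hlen : PySem.List.len R = (R.length : Int) := by simp [PySem.List.len_eq]
  rw [hlen]
  congr 1
  apply List.filter_congr
  intro j hj
  rcases (PySem.List.mem_pyRange_one).mp hj with ⟨hj0, hjlt⟩
  obtain ⟨k, rfl⟩ : ∃ k : Nat, j = (k : Int) := ⟨j.toNat, (Int.toNat_of_nonneg hj0).symm⟩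
  have hk : k < R.length := by exact_mod_cast hjlt
  have hget : PySem.List.pyGetD R (k : Int) [] = R[k] := by
    simp [PySem.List.pyGetD_natCast, hk]
  simp only [Function.comp_def, hget]
  by_cases hL : R[k] ∈ L
  · have h2 := (exist_iff R L k hk).mpr hL
    simp [h2, PySem.Set.contains, hL, PySem.Set.mem_ofList]
  · have h2 : ((mdTail R L 0).map (·.2)).any (fun ml => decide ((k : Int) ∈ ml)) = false :=
      Bool.eq_false_iff.mpr (fun h => hL ((exist_iff R L k hk).mp h))
    simp [h2, PySem.Set.contains, hL, PySem.Set.mem_ofList]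

-- ===== VERDICT (by name: the statement is the Claim_ definition above) =====
theorem find_matches_and_nons_spec : Claim_equal_find_matches_and_nons := by
  intro L R _
  unfold Spec_find_matches_and_nons find_matches_and_nons find_matches_and_nons_alt
  dsimp only
  rw [show (PySem.Dict.empty : PySem.Dict Int (List Int)) = PySem.Dict.mk [] from rfl,
      outerA R L 0 [] [] (by simp),
      outerB R _ (ridx_getD R) L 0 [] [] (by simp)]
  dsimp only
  simp only [List.nil_append]
  simp only [PySem.Dict.values_mk]
  exact congrArg (fun z => (mdTail R L 0, lnTail R L 0, z)) (right_nons_eq R L)
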